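-- pv_equiv track=rewrite | github.com/sdneycouto-jpg/eden-numerical-forensics | src/eden/auditor.py | batch_gcd
-- ===== SOURCE A (Python) =====
-- import math
--
-- def batch_gcd(moduli):
--     """
--     Heninger's product tree batch GCD.
--
--     Returns dict {index: factor} for keys sharing primes with others.
--     """
--     n = len(moduli)
--     if n < 2:
--         return {}
--
--     # Build product tree
--     tree = [list(moduli)]
--     while len(tree[-1]) > 1:
--         level = tree[-1]
--         new_level = []
--         for i in range(0, len(level), 2):
--             if i + 1 < len(level):
--                 new_level.append(level[i] * level[i + 1])
--             else:
--                 new_level.append(level[i])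
--         tree.append(new_level)
--
--     # Compute remainder tree
--     remainders = [tree[-1][0]]
--     for depth in range(len(tree) - 1, 0, -1):
--         new_rems = []
--         parents = remainders
--         children = tree[depth - 1]
--         for i, child in enumerate(children):
--             parent = parents[i // 2]
--             new_rems.append(parent % (child * child))
--         remainders = new_rems
--
--     # Each remainders[i] is m mod n_i^2, so gcd(remainders[i]//n_i, n_i)
--     # reveals a shared factor
--     shared = {}
--     for i, N in enumerate(moduli):
--         r = remainders[i] // N
--         g = math.gcd(r, N)
--         if 1 < g < N:
--             shared[i] = int(g)
--     return shared
-- ===== SOURCE B (Python) =====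
-- import math
--
-- def batch_gcd(moduli):
--     if len(moduli) < 2:
--         return {}
--     P = 1
--     for N in moduli:
--         P *= N
--     shared = {}
--     for i, N in enumerate(moduli):
--         g = math.gcd((P % (N * N)) // N, N)
--         if 1 < g < N:
--             shared[i] = int(g)
--     return shared
-- ===== Notes on version B (the rewrite author's own statement) =====
-- stated objective: simpler
-- what changed: Replaces the product-tree plus remainder-tree passes by one accumulated full product P and a direct per-modulus reduction (P % (N*N)) // N in a single loop.
import Mathlib
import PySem

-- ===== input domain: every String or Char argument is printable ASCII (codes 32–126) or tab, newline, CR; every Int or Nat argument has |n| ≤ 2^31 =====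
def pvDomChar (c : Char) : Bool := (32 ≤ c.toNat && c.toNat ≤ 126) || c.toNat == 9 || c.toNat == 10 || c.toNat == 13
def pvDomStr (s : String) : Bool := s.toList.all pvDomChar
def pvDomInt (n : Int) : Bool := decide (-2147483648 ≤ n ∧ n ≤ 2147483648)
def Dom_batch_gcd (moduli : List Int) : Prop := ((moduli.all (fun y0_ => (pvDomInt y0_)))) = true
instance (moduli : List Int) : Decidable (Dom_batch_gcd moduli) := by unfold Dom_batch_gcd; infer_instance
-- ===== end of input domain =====

-- B replaces A's product tree + remainder tree by one full product P and a per-modulus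
-- reduction P mod N_i^2 (objective: simpler — identical output, no tree passes).

-- ===== PORT A =====
-- inner 'for i in range(0, len(level), 2)' pairing loop of the tree builder
def pvPairup : List Int → List Int
  | [] => []
  | [x] => [x]
  | x :: y :: rest => x * y :: pvPairup rest

-- needed by pvBuildTree's termination
theorem pvPairup_length (l : List Int) : (pvPairup l).length = (l.length + 1) / 2 := by
  induction l using pvPairup.induct <;> simp [pvPairup, *] <;> omega

-- the 'while len(tree[-1]) > 1' loop; returns the whole tree [level0, level1, …, top]
def pvBuildTree (level : List Int) : List (List Int) :=
  if 1 < level.length then level :: pvBuildTree (pvPairup level) else [level]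
termination_by level.length
decreasing_by have := pvPairup_length level; omega

-- one iteration of the remainder-tree loop (children enumerated, parent = parents[i // 2])
def pvRemStep (parents children : List Int) : List Int :=
  (PySem.List.enumerate children).map
    (fun ic => PySem.Int.mod (PySem.List.pyGetD parents (PySem.Int.floordiv ic.1 2) 0) (ic.2 * ic.2))

-- the 'for depth in range(len(tree)-1, 0, -1)' loop, consuming the tree from the top down
def pvRemTree : List (List Int) → List Int
  | [] => []
  | [l] => [PySem.List.pyGetD l 0 0]
  | l :: rest => pvRemStep (pvRemTree rest) l

def batch_gcd (moduli : List Int) : List (Int × Int) :=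
  if moduli.length < 2 then []
  else
    let remainders := pvRemTree (pvBuildTree moduli)
    (PySem.List.enumerate moduli).foldl
      (fun shared iN =>
        let r := PySem.Int.floordiv (PySem.List.pyGetD remainders iN.1 0) iN.2
        let g : Int := ((r.gcd iN.2 : Nat) : Int)
        if 1 < g ∧ g < iN.2 then shared ++ [(iN.1, g)] else shared) []

-- ===== PORT B =====
def batch_gcd_alt (moduli : List Int) : List (Int × Int) :=
  if moduli.length < 2 then []
  else
    let P := moduli.foldl (· * ·) 1
    (PySem.List.enumerate moduli).foldl
      (fun shared iN =>
        let r := PySem.Int.floordiv (PySem.Int.mod P (iN.2 * iN.2)) iN.2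
        let g : Int := ((r.gcd iN.2 : Nat) : Int)
        if 1 < g ∧ g < iN.2 then shared ++ [(iN.1, g)] else shared) []

-- ===== PRECONDITION & SPEC =====
-- Pre_ excludes lists of length ≥ 2 containing 0, on which A (and B) raise ZeroDivisionError.
def Pre_batch_gcd (moduli : List Int) : Prop :=
  moduli.length < 2 ∨ ∀ x ∈ moduli, x ≠ 0
instance (moduli : List Int) : Decidable (Pre_batch_gcd moduli) := by unfold Pre_batch_gcd; infer_instance
def pvWitness_batch_gcd : List Int := [6, 35, 15]

def Spec_batch_gcd (moduli : List Int) (out : List (Int × Int)) : Prop := out = batch_gcd_alt moduli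
instance (moduli : List Int) (out : List (Int × Int)) : Decidable (Spec_batch_gcd moduli out) := by unfold Spec_batch_gcd; infer_instance

-- ===== CLAIM (what is proved, stated in full; the proofs are below) =====
def Claim_equal_batch_gcd : Prop := ∀ (moduli : List Int), Dom_batch_gcd moduli → Pre_batch_gcd moduli → Spec_batch_gcd moduli (batch_gcd moduli)

-- ===== LEMMAS AND PROOFS =====

theorem pvPairup_prod (l : List Int) : (pvPairup l).prod = l.prod := by
  induction l using pvPairup.induct <;> simp [pvPairup, *] <;> ring

theorem pvPairup_nonzero {l : List Int} (h : ∀ x ∈ l, x ≠ 0) : ∀ x ∈ pvPairup l, x ≠ 0 := by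
  induction l using pvPairup.induct with
  | case1 => simp [pvPairup]
  | case2 x => simpa [pvPairup] using h
  | case3 x y rest ih =>
    intro z hz
    simp only [pvPairup, List.mem_cons] at hz
    rcases hz with rfl | hz
    · exact mul_ne_zero (h x (by simp)) (h y (by simp))
    · exact ih (fun a ha => h a (by simp [ha])) z hz

theorem pvPairup_getD_dvd (l : List Int) : ∀ k, k < l.length →
    l.getD k 0 ∣ (pvPairup l).getD (k / 2) 0 := by
  induction l using pvPairup.induct with
  | case1 => intro k hk; simp at hk
  | case2 x =>
    intro k hk
    have hk0 : k = 0 := by simp at hk; omega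
    simp [pvPairup, hk0]
  | case3 x y rest ih =>
    intro k hk
    match k with
    | 0 => simp [pvPairup]
    | 1 => simp [pvPairup]
    | (m + 2) =>
      have : (m + 2) / 2 = m / 2 + 1 := by omega
      rw [this]
      simpa [pvPairup] using ih m (by simpa using hk)

theorem pvBuildTree_ne_nil (l : List Int) : pvBuildTree l ≠ [] := by
  rw [pvBuildTree]; split <;> simp

theorem pvBuildTree_of_lt {l : List Int} (h : 1 < l.length) :
    pvBuildTree l = l :: pvBuildTree (pvPairup l) := by
  rw [pvBuildTree]; simp [h]

theorem pvBuildTree_of_le {l : List Int} (h : ¬ 1 < l.length) : pvBuildTree l = [l] := by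
  rw [pvBuildTree]; simp [h]

-- one level of the remainder tree: with the parents' congruence invariant,
-- a child entry is exactly prod mod child²
theorem pvStep (l : List Int) (h2 : 2 ≤ l.length) (hnz : ∀ x ∈ l, x ≠ 0)
    (IH : ∀ j, j < (pvPairup l).length →
      Int.ModEq ((pvPairup l).getD j 0 * (pvPairup l).getD j 0)
        ((pvRemTree (pvBuildTree (pvPairup l))).getD j 0) (pvPairup l).prod) :
    ∀ k, k < l.length →
      (pvRemTree (pvBuildTree l)).getD k 0 = PySem.Int.mod l.prod (l.getD k 0 * l.getD k 0) := by
  intro k hk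
  have hb : pvBuildTree l = l :: pvBuildTree (pvPairup l) := pvBuildTree_of_lt (by omega)
  obtain ⟨t, ts, hT⟩ : ∃ t ts, pvBuildTree (pvPairup l) = t :: ts := by
    cases hE : pvBuildTree (pvPairup l) with
    | nil => exact absurd hE (pvBuildTree_ne_nil _)
    | cons t ts => exact ⟨t, ts, rfl⟩
  rw [hb, hT]
  show (pvRemStep (pvRemTree (t :: ts)) l).getD k 0 = _
  rw [← hT]
  have hlen : k < ((PySem.List.enumerate l).map (fun ic =>
      PySem.Int.mod (PySem.List.pyGetD (pvRemTree (pvBuildTree (pvPairup l)))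
        (PySem.Int.floordiv ic.1 2) 0) (ic.2 * ic.2))).length := by
    simpa [PySem.List.length_enumerate] using hk
  unfold pvRemStep
  rw [List.getD_eq_getElem _ _ hlen, List.getElem_map, PySem.List.getElem_enumerate]
  dsimp only
  have hfd : PySem.Int.floordiv ((0 : Int) + (k : Int)) 2 = ((k / 2 : Nat) : Int) := by
    have := PySem.Int.floordiv_natCast k 2
    push_cast at this ⊢
    simpa using this
  rw [hfd, PySem.List.pyGetD_natCast]
  -- the child and its pair parent
  have hm : (pvPairup l).length = (l.length + 1) / 2 := pvPairup_length l
  have hj : k / 2 < (pvPairup l).length := by omega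
  have hdvd : l.getD k 0 ∣ (pvPairup l).getD (k / 2) 0 := pvPairup_getD_dvd l k hk
  have hgd : l.getD k 0 = l[k] := List.getD_eq_getElem _ _ hk
  have hc : l[k] ≠ 0 := hnz _ (List.getElem_mem hk)
  have hpos : (0 : Int) < l[k] * l[k] := mul_self_pos.mpr hc
  rw [hgd] at hdvd ⊢
  rw [PySem.Int.mod_eq_emod_of_pos hpos, PySem.Int.mod_eq_emod_of_pos hpos]
  have hcong := Int.ModEq.of_dvd (mul_dvd_mul hdvd hdvd) (IH (k / 2) hj)
  rw [pvPairup_prod] at hcong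
  exact hcong

-- invariant of the remainder tree: each entry is ≡ the total product mod (own node)²
theorem pvRemTree_modEq : ∀ n (l : List Int), l.length = n → l ≠ [] → (∀ x ∈ l, x ≠ 0) →
    (pvRemTree (pvBuildTree l)).length = l.length ∧
    ∀ k, k < l.length →
      Int.ModEq (l.getD k 0 * l.getD k 0) ((pvRemTree (pvBuildTree l)).getD k 0) l.prod := by
  intro n
  induction n using Nat.strong_induction_on with
  | _ n IH =>
    intro l hl hne hnz
    by_cases h2 : 2 ≤ l.length
    · -- inner levels: exact values from pvStep, hence the congruence
      have hm : (pvPairup l).length = (l.length + 1) / 2 := pvPairup_length l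
      have hmne : pvPairup l ≠ [] := by
        intro h; rw [h] at hm; simp at hm; omega
      have ihm := IH ((pvPairup l).length) (by omega) (pvPairup l) rfl hmne (pvPairup_nonzero hnz)
      have hstep := pvStep l h2 hnz ihm.2
      constructor
      · rw [pvBuildTree_of_lt (by omega)]
        obtain ⟨t, ts, hT⟩ : ∃ t ts, pvBuildTree (pvPairup l) = t :: ts := by
          cases hE : pvBuildTree (pvPairup l) with
          | nil => exact absurd hE (pvBuildTree_ne_nil _)
          | cons t ts => exact ⟨t, ts, rfl⟩
        rw [hT]
        show (pvRemStep (pvRemTree (t :: ts)) l).length = _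
        simp [pvRemStep, PySem.List.length_enumerate]
      · intro k hk
        rw [hstep k hk]
        have hc : l.getD k 0 ≠ 0 := by
          rw [List.getD_eq_getElem _ _ hk]; exact hnz _ (List.getElem_mem hk)
        have hpos : (0 : Int) < l.getD k 0 * l.getD k 0 := mul_self_pos.mpr hc
        rw [PySem.Int.mod_eq_emod_of_pos hpos]
        exact Int.emod_emod_of_dvd _ dvd_rfl
    · -- the top level: a single node holding the product itself
      obtain ⟨x, rfl⟩ : ∃ x, l = [x] := by
        cases l with
        | nil => exact absurd rfl hne
        | cons a as =>
          cases as with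
          | nil => exact ⟨a, rfl⟩
          | cons b bs => simp at h2
      rw [pvBuildTree_of_le (by simp)]
      refine ⟨by simp [pvRemTree], ?_⟩
      intro k hk
      have hk0 : k = 0 := by simp at hk; omega
      subst hk0
      simp [pvRemTree, PySem.List.pyGetD_zero]

-- at the bottom level (length ≥ 2) the entries are exactly P mod node²
theorem pvRemTree_exact (l : List Int) (h2 : 2 ≤ l.length) (hnz : ∀ x ∈ l, x ≠ 0) :
    ∀ k, k < l.length →
      (pvRemTree (pvBuildTree l)).getD k 0 = PySem.Int.mod l.prod (l.getD k 0 * l.getD k 0) := by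
  have hm : (pvPairup l).length = (l.length + 1) / 2 := pvPairup_length l
  have hmne : pvPairup l ≠ [] := by
    intro h; rw [h] at hm; simp at hm; omega
  exact pvStep l h2 hnz
    (pvRemTree_modEq ((pvPairup l).length) (pvPairup l) rfl hmne (pvPairup_nonzero hnz)).2

-- ===== VERDICT (by name: the statement is the Claim_ definition above) =====
theorem batch_gcd_spec : Claim_equal_batch_gcd := by
  intro moduli _ hpre
  unfold Spec_batch_gcd batch_gcd batch_gcd_alt
  by_cases h : moduli.length < 2
  · simp [h]
  · have hnz : ∀ x ∈ moduli, x ≠ 0 := by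
      rcases hpre with h1 | h2
      · exact absurd h1 h
      · exact h2
    simp only [if_neg h]
    apply PySem.List.foldl_congr_mem
    intro acc p hp
    rw [PySem.List.mem_enumerate_iff] at hp
    obtain ⟨k, hk, rfl⟩ := hp
    have hcast : (0 : Int) + (k : Int) = ((k : Nat) : Int) := by push_cast; ring
    rw [hcast, PySem.List.pyGetD_natCast]
    rw [pvRemTree_exact moduli (by omega) hnz k hk]
    rw [List.getD_eq_getElem _ _ hk, List.prod_eq_foldl]
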